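-- pv_equiv track=rewrite | github.com/mendozalz/ESTUD-IA---IA-DEVELOPER---EJE-TEMATICO-1 | IA-DEVELOPER-N2/U06-Integracion-IA-Aplicaciones-Reales/02-Laboratorios/Laboratorio 6.2 - Análisis de Sentimiento con Vue.js y Flask/backend/utils/text_processing.py | _extract_sentiment_indicators
-- ===== SOURCE A (Python) =====
-- from typing import List, Dict, Any
--
-- def _extract_sentiment_indicators(text: str) -> Dict[str, int]:
--     """Extraer indicadores de sentimiento"""
--     positive_words = [
--         'good', 'great', 'excellent', 'amazing', 'wonderful', 'fantastic',
--         'love', 'like', 'awesome', 'perfect', 'best', 'happy', 'joy',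
--         'beautiful', 'nice', 'brilliant', 'outstanding', 'superb'
--     ]
--
--     negative_words = [
--         'bad', 'terrible', 'awful', 'horrible', 'hate', 'dislike',
--         'worst', 'poor', 'sad', 'angry', 'frustrated', 'disappointed',
--         'ugly', 'disgusting', 'useless', 'broken', 'failed', 'wrong'
--     ]
--
--     intensifiers = [
--         'very', 'extremely', 'really', 'absolutely', 'completely',
--         'totally', 'utterly', 'highly', 'deeply', 'truly'
--     ]
--
--     negations = [
--         'not', 'no', 'never', 'none', 'nothing', 'nowhere',
--         'neither', 'nor', 'cannot', "can't", "won't", "don't"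
--     ]
--
--     text_lower = text.lower()
--     words = text_lower.split()
--
--     indicators = {
--         "positive_count": 0,
--         "negative_count": 0,
--         "intensifier_count": 0,
--         "negation_count": 0,
--         "exclamation_count": text.count('!'),
--         "question_count": text.count('?')
--     }
--
--     for word in words:
--         if word in positive_words:
--             indicators["positive_count"] += 1
--         elif word in negative_words:
--             indicators["negative_count"] += 1
--         elif word in intensifiers:
--             indicators["intensifier_count"] += 1
--         elif word in negations:
--             indicators["negation_count"] += 1
--
--     return indicators
-- ===== SOURCE B (Python) =====
-- from typing import List, Dict, Any
--
-- def _extract_sentiment_indicators(text: str) -> Dict[str, int]: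
--     """Extraer indicadores de sentimiento (frequency-table variant)"""
--     positive_words = [
--         'good', 'great', 'excellent', 'amazing', 'wonderful', 'fantastic',
--         'love', 'like', 'awesome', 'perfect', 'best', 'happy', 'joy',
--         'beautiful', 'nice', 'brilliant', 'outstanding', 'superb'
--     ]
--
--     negative_words = [
--         'bad', 'terrible', 'awful', 'horrible', 'hate', 'dislike',
--         'worst', 'poor', 'sad', 'angry', 'frustrated', 'disappointed',
--         'ugly', 'disgusting', 'useless', 'broken', 'failed', 'wrong'
--     ]
--
--     intensifiers = [
--         'very', 'extremely', 'really', 'absolutely', 'completely',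
--         'totally', 'utterly', 'highly', 'deeply', 'truly'
--     ]
--
--     negations = [
--         'not', 'no', 'never', 'none', 'nothing', 'nowhere',
--         'neither', 'nor', 'cannot', "can't", "won't", "don't"
--     ]
--
--     counts = {}
--     for word in text.lower().split():
--         counts[word] = counts.get(word, 0) + 1
--
--     return {
--         "positive_count": sum(counts.get(w, 0) for w in positive_words),
--         "negative_count": sum(counts.get(w, 0) for w in negative_words),
--         "intensifier_count": sum(counts.get(w, 0) for w in intensifiers),
--         "negation_count": sum(counts.get(w, 0) for w in negations),
--         "exclamation_count": text.count('!'),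
--         "question_count": text.count('?'),
--     }
-- ===== Notes on version B (the rewrite author's own statement) =====
-- stated objective: idiomatic
-- what changed: B builds one frequency table of the lowercased tokens and computes each category count by summing table lookups over that category's vocabulary, instead of A's per-token elif membership chain.
import Mathlib
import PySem

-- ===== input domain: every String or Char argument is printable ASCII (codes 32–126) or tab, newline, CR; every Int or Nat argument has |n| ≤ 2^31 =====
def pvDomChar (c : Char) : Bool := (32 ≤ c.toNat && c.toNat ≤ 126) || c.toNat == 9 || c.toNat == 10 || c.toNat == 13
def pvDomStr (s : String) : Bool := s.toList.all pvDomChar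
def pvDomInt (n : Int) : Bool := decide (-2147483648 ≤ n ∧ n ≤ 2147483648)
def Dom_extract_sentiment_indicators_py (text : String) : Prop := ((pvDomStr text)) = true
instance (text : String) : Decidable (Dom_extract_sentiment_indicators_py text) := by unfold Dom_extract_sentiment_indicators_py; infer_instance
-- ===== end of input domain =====

-- B replaces A's per-token elif chain by one frequency table of the words, then sums the
-- table's entries over each (disjoint) category vocabulary: a more idiomatic decomposition.

-- the four category vocabularies (shared module constants of A and B)
def pvPositive : List String :=
  ["good", "great", "excellent", "amazing", "wonderful", "fantastic",
   "love", "like", "awesome", "perfect", "best", "happy", "joy",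
   "beautiful", "nice", "brilliant", "outstanding", "superb"]

def pvNegative : List String :=
  ["bad", "terrible", "awful", "horrible", "hate", "dislike",
   "worst", "poor", "sad", "angry", "frustrated", "disappointed",
   "ugly", "disgusting", "useless", "broken", "failed", "wrong"]

def pvIntensifiers : List String :=
  ["very", "extremely", "really", "absolutely", "completely",
   "totally", "utterly", "highly", "deeply", "truly"]

def pvNegations : List String :=
  ["not", "no", "never", "none", "nothing", "nowhere",
   "neither", "nor", "cannot", "can't", "won't", "don't"]

-- ===== PORT A =====
-- the body of A's `for word in words:` loop
def pvStepA (d : PySem.Dict String Int) (word : String) : PySem.Dict String Int :=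
  if pvPositive.contains word then d.modify "positive_count" 0 (· + 1)
  else if pvNegative.contains word then d.modify "negative_count" 0 (· + 1)
  else if pvIntensifiers.contains word then d.modify "intensifier_count" 0 (· + 1)
  else if pvNegations.contains word then d.modify "negation_count" 0 (· + 1)
  else d

def extract_sentiment_indicators_py (text : String) : List (String × Int) :=
  let text_lower := PySem.Str.lower text
  let words := PySem.Str.split₀ text_lower
  let indicators : PySem.Dict String Int := PySem.Dict.ofList
    [("positive_count", 0), ("negative_count", 0), ("intensifier_count", 0),
     ("negation_count", 0), ("exclamation_count", (PySem.Str.count text "!" : Int)),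
     ("question_count", (PySem.Str.count text "?" : Int))]
  let indicators := words.foldl pvStepA indicators
  indicators.items

-- ===== PORT B =====
def extract_sentiment_indicators_py_alt (text : String) : List (String × Int) :=
  let counts := (PySem.Str.split₀ (PySem.Str.lower text)).foldl
    (fun d w => d.insert w (d.getD w 0 + 1)) PySem.Dict.empty
  [("positive_count", (pvPositive.map (fun w => counts.getD w 0)).sum),
   ("negative_count", (pvNegative.map (fun w => counts.getD w 0)).sum),
   ("intensifier_count", (pvIntensifiers.map (fun w => counts.getD w 0)).sum),
   ("negation_count", (pvNegations.map (fun w => counts.getD w 0)).sum),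
   ("exclamation_count", (PySem.Str.count text "!" : Int)),
   ("question_count", (PySem.Str.count text "?" : Int))]

-- ===== PRECONDITION & SPEC =====
def Spec_extract_sentiment_indicators_py (text : String) (out : List (String × Int)) : Prop := out = extract_sentiment_indicators_py_alt text
instance (text : String) (out : List (String × Int)) : Decidable (Spec_extract_sentiment_indicators_py text out) := by unfold Spec_extract_sentiment_indicators_py; infer_instance

-- ===== CLAIM (what is proved, stated in full; the proofs are below) =====
def Claim_equal_extract_sentiment_indicators_py : Prop := ∀ (text : String), Dom_extract_sentiment_indicators_py text → Spec_extract_sentiment_indicators_py text (extract_sentiment_indicators_py text)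

-- ===== LEMMAS AND PROOFS =====

-- the four vocabularies are pairwise disjoint, so A's elif priority is vacuous
lemma pv_disj_pos : ∀ w ∈ pvPositive,
    w ∉ pvNegative ∧ w ∉ pvIntensifiers ∧ w ∉ pvNegations := by decide

lemma pv_disj_neg : ∀ w ∈ pvNegative, w ∉ pvIntensifiers ∧ w ∉ pvNegations := by decide

lemma pv_disj_int : ∀ w ∈ pvIntensifiers, w ∉ pvNegations := by decide

-- the Python dict literal, as an items list
lemma pv_ofList_init (e q : Int) :
    PySem.Dict.ofList
      [("positive_count", (0:Int)), ("negative_count", 0), ("intensifier_count", 0),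
       ("negation_count", 0), ("exclamation_count", e), ("question_count", q)]
    = PySem.Dict.mk
      [("positive_count", 0), ("negative_count", 0), ("intensifier_count", 0),
       ("negation_count", 0), ("exclamation_count", e), ("question_count", q)] := by
  simp [PySem.Dict.ofList, PySem.Dict.update, PySem.Dict.insert, PySem.Dict.contains,
        PySem.Dict.empty]

-- A's elif loop, characterised: each counter ends as start + number of tokens in its vocabulary
lemma pv_loop_items (ws : List String) : ∀ (p n i g e q : Int),
    (ws.foldl pvStepA
      (PySem.Dict.mk
        [("positive_count", p), ("negative_count", n), ("intensifier_count", i),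
         ("negation_count", g), ("exclamation_count", e), ("question_count", q)])).items
    = [("positive_count", p + (ws.countP (fun w => pvPositive.contains w) : Int)),
       ("negative_count", n + (ws.countP (fun w => pvNegative.contains w) : Int)),
       ("intensifier_count", i + (ws.countP (fun w => pvIntensifiers.contains w) : Int)),
       ("negation_count", g + (ws.countP (fun w => pvNegations.contains w) : Int)),
       ("exclamation_count", e), ("question_count", q)] := by
  induction ws with
  | nil => intro p n i g e q; simp
  | cons w ws ih =>
    intro p n i g e q
    by_cases h1 : w ∈ pvPositive
    · have hd := pv_disj_pos w h1
      rw [List.foldl_cons]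
      have hstep : pvStepA (PySem.Dict.mk
          [("positive_count", p), ("negative_count", n), ("intensifier_count", i),
           ("negation_count", g), ("exclamation_count", e), ("question_count", q)]) w
        = PySem.Dict.mk
          [("positive_count", p + 1), ("negative_count", n), ("intensifier_count", i),
           ("negation_count", g), ("exclamation_count", e), ("question_count", q)] := by
        simp [pvStepA, h1, PySem.Dict.modify, PySem.Dict.insert, PySem.Dict.contains,
              PySem.Dict.getD, PySem.Dict.get?]
      rw [hstep, ih]
      simp [h1, hd.1, hd.2.1, hd.2.2]
      omega
    · by_cases h2 : w ∈ pvNegative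
      · have hd := pv_disj_neg w h2
        rw [List.foldl_cons]
        have hstep : pvStepA (PySem.Dict.mk
            [("positive_count", p), ("negative_count", n), ("intensifier_count", i),
             ("negation_count", g), ("exclamation_count", e), ("question_count", q)]) w
          = PySem.Dict.mk
            [("positive_count", p), ("negative_count", n + 1), ("intensifier_count", i),
             ("negation_count", g), ("exclamation_count", e), ("question_count", q)] := by
          simp [pvStepA, h1, h2, PySem.Dict.modify, PySem.Dict.insert, PySem.Dict.contains,
                PySem.Dict.getD, PySem.Dict.get?]
        rw [hstep, ih]
        simp [h1, h2, hd.1, hd.2]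
        omega
      · by_cases h3 : w ∈ pvIntensifiers
        · have hd := pv_disj_int w h3
          rw [List.foldl_cons]
          have hstep : pvStepA (PySem.Dict.mk
              [("positive_count", p), ("negative_count", n), ("intensifier_count", i),
               ("negation_count", g), ("exclamation_count", e), ("question_count", q)]) w
            = PySem.Dict.mk
              [("positive_count", p), ("negative_count", n), ("intensifier_count", i + 1),
               ("negation_count", g), ("exclamation_count", e), ("question_count", q)] := by
            simp [pvStepA, h1, h2, h3, PySem.Dict.modify, PySem.Dict.insert, PySem.Dict.contains,
                  PySem.Dict.getD, PySem.Dict.get?]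
          rw [hstep, ih]
          simp [h1, h2, h3, hd]
          omega
        · by_cases h4 : w ∈ pvNegations
          · rw [List.foldl_cons]
            have hstep : pvStepA (PySem.Dict.mk
                [("positive_count", p), ("negative_count", n), ("intensifier_count", i),
                 ("negation_count", g), ("exclamation_count", e), ("question_count", q)]) w
              = PySem.Dict.mk
                [("positive_count", p), ("negative_count", n), ("intensifier_count", i),
                 ("negation_count", g + 1), ("exclamation_count", e), ("question_count", q)] := by
              simp [pvStepA, h1, h2, h3, h4, PySem.Dict.modify, PySem.Dict.insert,
                    PySem.Dict.contains, PySem.Dict.getD, PySem.Dict.get?]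
            rw [hstep, ih]
            simp [h1, h2, h3, h4]
            omega
          · rw [List.foldl_cons]
            have hstep : ∀ d : PySem.Dict String Int, pvStepA d w = d := by
              intro d; simp [pvStepA, h1, h2, h3, h4]
            rw [hstep, ih]
            simp [h1, h2, h3, h4]

-- a vocabulary's tally: summing per-word counts equals counting tokens in the vocabulary
lemma pv_countP_cons_vocab (a : String) (l : List String) (ha : a ∉ l)
    (ws : List String) :
    ws.countP (fun x => (a :: l).contains x) = ws.count a + ws.countP (fun x => l.contains x) := by
  induction ws with
  | nil => simp
  | cons x ws ih =>
    simp only [List.countP_cons, List.count_cons, ih]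
    by_cases hx : x = a
    · subst hx; simp [ha]; omega
    · by_cases hl : x ∈ l <;> simp [hx, hl] <;> omega

lemma pv_sum_count (l : List String) (hl : l.Nodup) (ws : List String) :
    (l.map (fun w => (ws.count w : Int))).sum = (ws.countP (fun x => l.contains x) : Int) := by
  induction l with
  | nil => simp
  | cons a l ih =>
    rw [pv_countP_cons_vocab a l (List.nodup_cons.mp hl).1 ws]
    simp only [List.map_cons, List.sum_cons, ih (List.nodup_cons.mp hl).2]
    push_cast
    ring

-- ===== VERDICT (by name: the statement is the Claim_ definition above) =====
theorem extract_sentiment_indicators_py_spec : Claim_equal_extract_sentiment_indicators_py := by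
  intro text _
  unfold Spec_extract_sentiment_indicators_py
  unfold extract_sentiment_indicators_py extract_sentiment_indicators_py_alt
  simp only [PySem.Dict.foldl_insert_getD_add_one_eq_counter, PySem.Dict.getD_counter,
    pv_ofList_init, pv_loop_items]
  rw [pv_sum_count pvPositive (by decide), pv_sum_count pvNegative (by decide),
      pv_sum_count pvIntensifiers (by decide), pv_sum_count pvNegations (by decide)]
  simp
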